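-- pv_equiv track=rewrite | github.com/Copper76/SotonHackthon2021 | replace.py | rep_words_flex
-- ===== SOURCE A (Python) =====
-- import math
--
-- def calc_dist(string1, string2):
--     val = 0
--     if string1 == "":
--         return len(string2)
--     elif string2 == "":
--         return len(string1)
--     elif string1[0] == string2[0]:
--         val += calc_dist(string1[1:], string2[1:])
--     else:
--         val = 1 + min(
--             [calc_dist(string1, string2[1:]), calc_dist(string1[1:], string2), calc_dist(string1[1:], string2[1:])])
--     return val
--
-- def rep_words_flex(inputString, keywords):
--     final = ""
--     words = inputString.split()
--     for word in words:
--         insert = word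
--         for keyword in keywords:
--             threshold = math.floor(len(keyword) / 4)
--             if calc_dist(word.lower(), keyword.lower()) < threshold:
--                 insert = keyword
--                 break
--         final += " " + insert
--     return final
-- ===== SOURCE B (Python) =====
-- def _lev(a, b):
--     # suffix-based dynamic-programming Levenshtein (same recurrence as the
--     # recursive definition: free match on equal heads), O(len(a)*len(b))
--     nb = len(b)
--     prev = list(range(nb, -1, -1))          # prev[j] = distance(:"", b[j:]) = nb - j
--     for i in range(len(a) - 1, -1, -1):
--         ca = a[i]
--         cur = [0] * (nb + 1)
--         cur[nb] = len(a) - i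
--         for j in range(nb - 1, -1, -1):
--             if ca == b[j]:
--                 cur[j] = prev[j + 1]
--             else:
--                 cur[j] = 1 + min(cur[j + 1], prev[j], prev[j + 1])
--         prev = cur
--     return prev[0]
--
-- def rep_words_flex(inputString, keywords):
--     pieces = []
--     for word in inputString.split():
--         wl = word.lower()
--         insert = word
--         for keyword in keywords:
--             if _lev(wl, keyword.lower()) < len(keyword) // 4:
--                 insert = keyword
--                 break
--         pieces.append(" " + insert)
--     return "".join(pieces)
-- ===== Notes on version B (the rewrite author's own statement) =====
-- stated objective: faster
-- what changed: Replaced the exponential three-way recursive edit-distance with an O(n*m) dynamic-programming row table (suffix rows), and built the result by joining collected pieces instead of repeated string concatenation.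
import Mathlib
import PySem

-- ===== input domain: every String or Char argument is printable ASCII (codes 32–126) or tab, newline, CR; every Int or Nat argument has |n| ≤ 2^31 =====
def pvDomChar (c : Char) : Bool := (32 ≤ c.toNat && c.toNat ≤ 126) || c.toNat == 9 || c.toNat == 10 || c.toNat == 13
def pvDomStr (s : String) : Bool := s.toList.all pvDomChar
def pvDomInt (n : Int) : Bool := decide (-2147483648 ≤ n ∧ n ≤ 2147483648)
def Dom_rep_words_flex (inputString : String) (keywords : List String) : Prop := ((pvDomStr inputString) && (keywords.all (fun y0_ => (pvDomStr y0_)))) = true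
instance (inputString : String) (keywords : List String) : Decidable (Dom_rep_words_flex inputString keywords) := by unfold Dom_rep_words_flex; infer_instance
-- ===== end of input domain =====

-- B replaces the exponential recursive edit-distance with an O(n*m) DP row table
-- (asymptotically faster) and joins collected pieces instead of concatenating.


-- ===== PORT A =====
-- calc_dist, literal: recursion on the heads, three-way min branch
def calcDist : List Char → List Char → Nat
  | [], s2 => s2.length
  | s1, [] => s1.length
  | c1 :: t1, c2 :: t2 =>
      if c1 = c2 then calcDist t1 t2
      else 1 + min (calcDist (c1 :: t1) t2) (min (calcDist t1 (c2 :: t2)) (calcDist t1 t2))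
termination_by s1 s2 => s1.length + s2.length

-- the inner 'for keyword in keywords: … break' loop of A
def pickA (word : String) : List String → String
  | [] => word
  | k :: ks =>
      if calcDist (PySem.Str.lower word).toList (PySem.Str.lower k).toList < PySem.Str.len k / 4
      then k else pickA word ks

def rep_words_flex (inputString : String) (keywords : List String) : String :=
  String.ofList (((PySem.Str.split₀ inputString)).foldl
    (fun acc w => acc ++ (' ' :: (pickA w keywords).toList)) [])

-- ===== PORT B =====
-- one DP row step (the descending j loop of Source B, built right-to-left)
def rowB (ca : Char) (n : Nat) : List Char → List Nat → List Nat
  | [], _ => [n]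
  | cb :: bs, p :: pd :: ps =>
      let rest := rowB ca n bs (pd :: ps)
      (if ca = cb then pd else 1 + min (rest.headD 0) (min p pd)) :: rest
  | _ :: _, _ => []

-- base row: distances against the empty suffix of a, i.e. [nb, nb-1, …, 0]
def baseRowB : List Char → List Nat
  | [] => [0]
  | _ :: bs => (bs.length + 1) :: baseRowB bs

-- the descending i loop of Source B: rows for ever longer suffixes of a
def rowsB (b : List Char) : List Char → List Nat
  | [] => baseRowB b
  | ca :: as_ => rowB ca (as_.length + 1) b (rowsB b as_)

def levB (a b : List Char) : Nat := (rowsB b a).headD 0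

-- the inner keyword loop of Source B
def pickB (word : String) : List String → String
  | [] => word
  | k :: ks =>
      if levB (PySem.Str.lower word).toList (PySem.Str.lower k).toList < PySem.Str.len k / 4
      then k else pickB word ks

def rep_words_flex_alt (inputString : String) (keywords : List String) : String :=
  String.ofList (PySem.Chars.join []
    ((PySem.Str.split₀ inputString).map (fun w => ' ' :: (pickB w keywords).toList)))

-- ===== PRECONDITION & SPEC =====
def Spec_rep_words_flex (inputString : String) (keywords : List String) (out : String) : Prop := out = rep_words_flex_alt inputString keywords
instance (inputString : String) (keywords : List String) (out : String) : Decidable (Spec_rep_words_flex inputString keywords out) := by unfold Spec_rep_words_flex; infer_instance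

-- ===== CLAIM (what is proved, stated in full; the proofs are below) =====
def Claim_equal_rep_words_flex : Prop := ∀ (inputString : String) (keywords : List String), Dom_rep_words_flex inputString keywords → Spec_rep_words_flex inputString keywords (rep_words_flex inputString keywords)

-- ===== LEMMAS AND PROOFS =====

-- the row of calc_dist values against every suffix of b
def specRow (t1 : List Char) : List Char → List Nat
  | [] => [calcDist t1 []]
  | c :: bs => calcDist t1 (c :: bs) :: specRow t1 bs

theorem specRow_eq_cons (t1 bs : List Char) :
    specRow t1 bs = calcDist t1 bs :: (specRow t1 bs).tail := by
  cases bs <;> rfl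

theorem specRow_headD (t1 b : List Char) : (specRow t1 b).headD 0 = calcDist t1 b := by
  cases b <;> rfl

theorem baseRowB_spec (b : List Char) : baseRowB b = specRow [] b := by
  induction b with
  | nil => simp [baseRowB, specRow, calcDist]
  | cons c bs ih => simp [baseRowB, specRow, ih, calcDist]

theorem rowB_spec (ca : Char) (t1 : List Char) :
    ∀ b : List Char, rowB ca (t1.length + 1) b (specRow t1 b) = specRow (ca :: t1) b := by
  intro b
  induction b with
  | nil => simp [rowB, specRow, calcDist]
  | cons c bs ih =>
      have h := specRow_eq_cons t1 bs
      have hrest : rowB ca (t1.length + 1) bs (calcDist t1 bs :: (specRow t1 bs).tail)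
          = specRow (ca :: t1) bs := by rw [← h]; exact ih
      rw [show specRow t1 (c :: bs)
            = calcDist t1 (c :: bs) :: calcDist t1 bs :: (specRow t1 bs).tail from by
          rw [specRow, ← h]]
      simp only [rowB, hrest, specRow_headD]
      rw [show specRow (ca :: t1) (c :: bs)
            = calcDist (ca :: t1) (c :: bs) :: specRow (ca :: t1) bs from rfl]
      simp [calcDist]

theorem rowsB_spec (b : List Char) : ∀ as_ : List Char, rowsB b as_ = specRow as_ b := by
  intro as_
  induction as_ with
  | nil => exact baseRowB_spec b
  | cons ca t ih => rw [rowsB, ih, rowB_spec]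

theorem levB_eq_calcDist (a b : List Char) : levB a b = calcDist a b := by
  rw [levB, rowsB_spec, specRow_headD]

theorem pickB_eq_pickA (word : String) (ks : List String) : pickB word ks = pickA word ks := by
  induction ks with
  | nil => rfl
  | cons k ks ih => simp [pickA, pickB, levB_eq_calcDist, ih]

theorem join_nil_flatten : ∀ l : List (List Char), PySem.Chars.join [] l = l.flatten := by
  intro l
  induction l with
  | nil => rfl
  | cons x xs ih =>
      cases xs with
      | nil => simp [PySem.Chars.join, List.intercalate, List.intersperse]
      | cons y ys =>
          simp only [PySem.Chars.join, List.intercalate, List.intersperse] at ih ⊢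
          simp [ih]

theorem join_map_eq_foldl (f : String → List Char) :
    ∀ (l : List String) (acc : List Char),
      l.foldl (fun a w => a ++ (' ' :: f w)) acc = acc ++ PySem.Chars.join [] (l.map (fun w => ' ' :: f w)) := by
  intro l
  induction l with
  | nil => intro acc; simp
  | cons w ws ih =>
      intro acc
      simp only [List.foldl, List.map]
      rw [ih, join_nil_flatten, join_nil_flatten]
      simp

-- ===== VERDICT (by name: the statement is the Claim_ definition above) =====
theorem rep_words_flex_spec : Claim_equal_rep_words_flex := by
  intro s ks _
  unfold Spec_rep_words_flex rep_words_flex rep_words_flex_alt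
  rw [join_map_eq_foldl (fun w => (pickA w ks).toList)]
  simp [pickB_eq_pickA]
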